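-- pv_equiv track=rewrite | github.com/garyukong/data-structures-and-algorithms | Project 3/Submission 2/problem_3.py | rearrange_digits
-- ===== SOURCE A (Python) =====
-- def reverse_mergesort(items):
--
--     if len(items) <= 1:
--         return items
--
--     mid = len(items) // 2
--     left = items[:mid]
--     right = items[mid:]
--
--     left = reverse_mergesort(left)
--     right = reverse_mergesort(right)
--
--     return reverse_merge(left, right)
--
-- def reverse_merge(left, right):
--
--     merged = []
--     left_index = 0
--     right_index = 0
--
--     while left_index < len(left) and right_index < len(right):
--         if left[left_index] < right[right_index]:
--             merged.append(right[right_index])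
--             right_index += 1
--         else:
--             merged.append(left[left_index])
--             left_index += 1
--
--     merged += left[left_index:]
--     merged += right[right_index:]
--
--     return merged
--
-- def rearrange_digits(input_list):
--     """
--     Rearrange Array Elements so as to form two number such that their sum is maximum.
--
--     Args:
--        input_list(list): Input List
--     Returns:
--        (int),(int): Two maximum sums
--     """
--     if len(input_list) >= 2:
--
--         # Sort the input list in descending order
--         sorted_input_list = reverse_mergesort(input_list)
--
--         # Create an empty output list for the two maximum sums
--         out = ['','']
--
--         # Iterate through elements of the sorted list
--         for index, element in enumerate(sorted_input_list):
--
--             ## If index is even, concatenate to the first cell of the output list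
--             if index % 2 == 0:
--                 out[0] += str(element)
--
--             # If index is odd, concatenate to the second cell of the output list
--             else:
--                 out[1] += str(element)
--
--         # Convert output list into a list of integers
--         out[0], out[1] = int(out[0]), int(out[1])
--
--         return out
-- ===== SOURCE B (Python) =====
-- def rearrange_digits(input_list):
--     """
--     Rearrange Array Elements so as to form two number such that their sum is maximum.
--
--     Args:
--        input_list(list): Input List
--     Returns:
--        (int),(int): Two maximum sums
--     """
--     if len(input_list) < 2:
--         return
--     s = sorted(input_list, reverse=True)
--     return [int(''.join(map(str, s[0::2]))), int(''.join(map(str, s[1::2])))]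
-- ===== Notes on version B (the rewrite author's own statement) =====
-- stated objective: simpler
-- what changed: Replaces the hand-written recursive merge sort (two helper functions) with the built-in stable sorted(reverse=True), and replaces the index-parity accumulation loop with stride slices s[0::2]/s[1::2] joined into the two numbers.
-- outside the precondition, e.g. on rearrange_digits([5]): A returns None, B returns None; on rearrange_digits([3, 2, -1]): A raises ValueError, B raises ValueError
import Mathlib
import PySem

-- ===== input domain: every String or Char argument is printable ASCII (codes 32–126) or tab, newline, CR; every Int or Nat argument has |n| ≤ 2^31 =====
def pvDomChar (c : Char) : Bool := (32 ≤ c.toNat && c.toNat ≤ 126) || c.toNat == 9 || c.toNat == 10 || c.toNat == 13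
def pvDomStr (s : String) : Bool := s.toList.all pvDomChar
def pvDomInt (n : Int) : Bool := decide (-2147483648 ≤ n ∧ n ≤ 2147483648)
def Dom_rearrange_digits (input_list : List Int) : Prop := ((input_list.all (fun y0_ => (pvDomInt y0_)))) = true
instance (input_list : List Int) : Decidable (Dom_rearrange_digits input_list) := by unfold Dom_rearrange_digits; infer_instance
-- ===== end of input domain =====

-- B replaces A's recursive merge sort and index-parity loop by the library sort plus stride slices (objective: simpler).
-- Equivalence is about the RETURN value; neither program mutates its argument.

-- ===== PORT A =====
-- helper reverse_merge: the while-loop over two indices, as structural recursion on the two suffixes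
def reverse_merge : List Int → List Int → List Int
  | [], right => right
  | left, [] => left
  | x :: xs, y :: ys =>
    if x < y then y :: reverse_merge (x :: xs) ys
    else x :: reverse_merge xs (y :: ys)
termination_by l r => l.length + r.length

-- helper reverse_mergesort: split at len//2, recurse, merge
def reverse_mergesort (items : List Int) : List Int :=
  if items.length ≤ 1 then items
  else
    reverse_merge (reverse_mergesort (items.take (items.length / 2)))
                  (reverse_mergesort (items.drop (items.length / 2)))
termination_by items.length
decreasing_by
  · simp; omega
  · simp; omega

-- the for-loop over enumerate(sorted_input_list): index counter, two string accumulators (strings as List Char)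
def pvLoopA : List Int → Nat → List Char → List Char → List Char × List Char
  | [], _, a, b => (a, b)
  | x :: xs, i, a, b =>
    if i % 2 = 0 then pvLoopA xs (i + 1) (a ++ PySem.Int.toChars x) b
    else pvLoopA xs (i + 1) a (b ++ PySem.Int.toChars x)

def rearrange_digits (input_list : List Int) : List Int :=
  if input_list.length ≥ 2 then
    let s := reverse_mergesort input_list
    let o := pvLoopA s 0 [] []
    -- int(out[0]), int(out[1]); Pre_ guarantees the parse succeeds (Python raises ValueError otherwise)
    [(PySem.Int.ofChars? o.1).getD 0, (PySem.Int.ofChars? o.2).getD 0]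
  else []  -- Python falls through and returns None here; excluded by Pre_

-- ===== PORT B =====
-- s[·::2]: every second element (step-2 slice, ported by hand; exact for step 2 from the start)
def pvStride2 : List Int → List Int
  | [] => []
  | [x] => [x]
  | x :: _ :: rest => x :: pvStride2 rest

def rearrange_digits_alt (input_list : List Int) : List Int :=
  if input_list.length < 2 then []  -- Python returns None here; excluded by Pre_
  else
    let s := PySem.List.sorted input_list (fun x => x) true
    [(PySem.Int.ofChars? (((pvStride2 s).map PySem.Int.toChars).flatten)).getD 0,
     (PySem.Int.ofChars? (((pvStride2 (s.drop 1)).map PySem.Int.toChars).flatten)).getD 0]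

-- ===== PRECONDITION & SPEC =====
-- Pre_ excludes lists of length < 2 (A falls through and returns None, not a list) and lists of
-- length ≥ 3 containing a negative element (there str(element) puts a '-' inside a concatenation
-- and int() raises ValueError in A — and in B alike).
def Pre_rearrange_digits (input_list : List Int) : Prop :=
  2 ≤ input_list.length ∧ (input_list.length = 2 ∨ ∀ x ∈ input_list, 0 ≤ x)
instance (input_list : List Int) : Decidable (Pre_rearrange_digits input_list) := by
  unfold Pre_rearrange_digits; infer_instance

def pvWitness_rearrange_digits : List Int := [4, 1, 3, 2]

def Spec_rearrange_digits (input_list : List Int) (out : List Int) : Prop := out = rearrange_digits_alt input_list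
instance (input_list : List Int) (out : List Int) : Decidable (Spec_rearrange_digits input_list out) := by unfold Spec_rearrange_digits; infer_instance

-- ===== CLAIM (what is proved, stated in full; the proofs are below) =====
def Claim_equal_rearrange_digits : Prop := ∀ (input_list : List Int), Dom_rearrange_digits input_list → Pre_rearrange_digits input_list → Spec_rearrange_digits input_list (rearrange_digits input_list)

-- ===== LEMMAS AND PROOFS =====

-- A's merge sort produces exactly Python's sorted(·, reverse=True)
lemma reverse_merge_perm (l r : List Int) : (reverse_merge l r).Perm (l ++ r) := by
  induction l, r using reverse_merge.induct with
  | case1 r => simp [reverse_merge]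
  | case2 l h => simp [reverse_merge]
  | case3 x xs y ys h ih =>
      simp only [reverse_merge, if_pos h]
      exact (ih.cons y).trans List.perm_middle.symm
  | case4 x xs y ys h ih =>
      simp only [reverse_merge, if_neg h]
      exact ih.cons x

lemma reverse_merge_sorted (l r : List Int) (hl : l.Pairwise (· ≥ ·)) (hr : r.Pairwise (· ≥ ·)) :
    (reverse_merge l r).Pairwise (· ≥ ·) := by
  induction l, r using reverse_merge.induct with
  | case1 r => simpa [reverse_merge]
  | case2 l h => simpa [reverse_merge]
  | case3 x xs y ys h ih =>
      simp only [reverse_merge, if_pos h]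
      rcases List.pairwise_cons.mp hl with ⟨hx, hxs⟩
      rcases List.pairwise_cons.mp hr with ⟨hy, hys⟩
      refine List.pairwise_cons.mpr ⟨?_, ih hl hys⟩
      intro z hz
      have hz' := (reverse_merge_perm (x :: xs) ys).mem_iff.mp hz
      rcases List.mem_append.mp hz' with hz'' | hz''
      · rcases List.mem_cons.mp hz'' with rfl | hz3
        · exact le_of_lt h
        · exact le_trans (hx z hz3) (le_of_lt h)
      · exact hy z hz''
  | case4 x xs y ys h ih =>
      simp only [reverse_merge, if_neg h]
      rcases List.pairwise_cons.mp hl with ⟨hx, hxs⟩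
      rcases List.pairwise_cons.mp hr with ⟨hy, hys⟩
      refine List.pairwise_cons.mpr ⟨?_, ih hxs hr⟩
      intro z hz
      have hz' := (reverse_merge_perm xs (y :: ys)).mem_iff.mp hz
      rcases List.mem_append.mp hz' with hz'' | hz''
      · exact hx z hz''
      · rcases List.mem_cons.mp hz'' with rfl | hz3
        · exact le_of_not_gt h
        · exact le_trans (hy z hz3) (le_of_not_gt h)

lemma reverse_mergesort_perm (items : List Int) : (reverse_mergesort items).Perm items := by
  induction items using reverse_mergesort.induct with
  | case1 items h => simp [reverse_mergesort, h]
  | case2 items h ih1 ih2 =>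
      rw [reverse_mergesort, if_neg h]
      exact (reverse_merge_perm _ _).trans
        ((ih1.append ih2).trans (by rw [List.take_append_drop]))

lemma reverse_mergesort_sorted (items : List Int) : (reverse_mergesort items).Pairwise (· ≥ ·) := by
  induction items using reverse_mergesort.induct with
  | case1 items h =>
      rw [reverse_mergesort, if_pos h]
      match items, h with
      | [], _ => exact List.Pairwise.nil
      | [x], _ => exact List.pairwise_singleton _ x
  | case2 items h ih1 ih2 =>
      rw [reverse_mergesort, if_neg h]
      exact reverse_merge_sorted _ _ ih1 ih2

lemma reverse_mergesort_eq_sorted (items : List Int) :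
    reverse_mergesort items = PySem.List.sorted items (fun x => x) true := by
  refine List.Perm.eq_of_pairwise (fun a b _ _ h1 h2 => le_antisymm h2 h1)
    (reverse_mergesort_sorted items) ?_
    ((reverse_mergesort_perm items).trans (PySem.List.sorted_perm items (fun x => x) true).symm)
  simpa using PySem.List.sorted_pairwise_rev items (fun x => x)

-- the characters B concatenates for the even-position slice
def pvEvenChars (s : List Int) : List Char := ((pvStride2 s).map PySem.Int.toChars).flatten

lemma pvEvenChars_cons (x : Int) (xs : List Int) :
    pvEvenChars (x :: xs) = PySem.Int.toChars x ++ pvEvenChars (xs.drop 1) := by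
  match xs with
  | [] => simp [pvEvenChars, pvStride2]
  | y :: rest => simp [pvEvenChars, pvStride2]

-- A's parity loop computes B's two stride concatenations
lemma pvLoopA_eq (s : List Int) : ∀ (i : Nat) (a b : List Char),
    pvLoopA s i a b =
      if i % 2 = 0 then (a ++ pvEvenChars s, b ++ pvEvenChars (s.drop 1))
      else (a ++ pvEvenChars (s.drop 1), b ++ pvEvenChars s) := by
  induction s with
  | nil => intro i a b; simp [pvLoopA, pvEvenChars, pvStride2]
  | cons x xs ih =>
      intro i a b
      by_cases hp : i % 2 = 0
      · have hp1 : ¬ (i + 1) % 2 = 0 := by omega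
        simp only [pvLoopA, if_pos hp, ih (i + 1), if_neg hp1,
          pvEvenChars_cons, List.drop_one, List.tail_cons, List.append_assoc]
      · have hp1 : (i + 1) % 2 = 0 := by omega
        simp only [pvLoopA, if_neg hp, ih (i + 1), if_pos hp1,
          pvEvenChars_cons, List.drop_one, List.tail_cons, List.append_assoc]

-- ===== VERDICT (by name: the statement is the Claim_ definition above) =====
theorem rearrange_digits_spec : Claim_equal_rearrange_digits := by
  intro input_list _ hpre
  unfold Spec_rearrange_digits rearrange_digits rearrange_digits_alt
  have h2 : 2 ≤ input_list.length := hpre.1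
  rw [if_pos h2, if_neg (by omega)]
  simp only [reverse_mergesort_eq_sorted, pvLoopA_eq, List.nil_append]
  rfl
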